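-- pv_equiv track=rewrite | github.com/Achyut08/LeetCode_Solutions | 2178-maximum-split-of-positive-even-integers/2178-maximum-split-of-positive-even-integers.py | maximumEvenSplit
-- ===== SOURCE A (Python) =====
-- from typing import List
--
-- def maximumEvenSplit(finalSum: int) -> List[int]:
--     ans=[]
--     if finalSum%2 == 1:
--         return []
--     i =2
--     sum1=0
--     while((sum1+i)<=finalSum):
--         ans.append(i)
--         sum1+=i
--         i += 2
--     temp = finalSum - sum1
--     ele = ans.pop() + temp
--     ans.append(ele)
--     return ans
-- ===== SOURCE B (Python) =====
-- import math
-- from typing import List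
--
--
-- def maximumEvenSplit(finalSum: int) -> List[int]:
--     if finalSum % 2 == 1:
--         return []
--     # largest k with 2+4+...+2k = k*(k+1) <= finalSum, in closed form
--     k = (math.isqrt(1 + 4 * finalSum) - 1) // 2
--     ans = list(range(2, 2 * k + 1, 2))
--     remainder = finalSum - k * (k + 1)
--     ans[-1] = ans[-1] + remainder
--     return ans
-- ===== Notes on version B (the rewrite author's own statement) =====
-- stated objective: faster
-- what changed: Replaces A's O(sqrt(n))-iteration accumulation loop by a closed form: the count k of summands is computed directly via math.isqrt, the list is built with range(2, 2k+1, 2) and the remainder is folded into the last element.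
import Mathlib
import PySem

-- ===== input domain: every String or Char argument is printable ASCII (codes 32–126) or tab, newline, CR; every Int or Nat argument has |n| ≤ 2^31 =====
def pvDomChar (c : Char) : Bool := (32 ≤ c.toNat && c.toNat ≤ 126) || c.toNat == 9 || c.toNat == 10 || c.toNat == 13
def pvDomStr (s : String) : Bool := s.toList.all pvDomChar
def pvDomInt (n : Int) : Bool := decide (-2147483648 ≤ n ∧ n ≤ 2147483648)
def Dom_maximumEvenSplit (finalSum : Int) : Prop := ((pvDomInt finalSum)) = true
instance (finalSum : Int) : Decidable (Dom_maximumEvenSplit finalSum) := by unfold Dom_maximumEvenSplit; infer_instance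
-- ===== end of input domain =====

-- B replaces A's Python-level accumulation loop by a closed form (isqrt count + range + remainder).

-- ===== PORT A =====
-- the while loop, with fuel making it total (fuel never runs out on the inputs reached from maximumEvenSplit)
def pvLoopA (s : Int) : Nat → Int → Int → List Int → (List Int × Int)
  | 0, sum1, _, ans => (ans, sum1)
  | fuel + 1, sum1, i, ans =>
    if sum1 + i ≤ s then pvLoopA s fuel (sum1 + i) (i + 2) (ans ++ [i])
    else (ans, sum1)

def maximumEvenSplit (finalSum : Int) : List Int :=
  if PySem.Int.mod finalSum 2 = 1 then []
  else
    let r := pvLoopA finalSum (finalSum.toNat + 1) 0 2 []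
    let ans := r.1
    let temp := finalSum - r.2
    let ele := PySem.List.pyGetD ans (-1) 0 + temp   -- ans.pop(): IndexError on empty is excluded by Pre_
    ans.dropLast ++ [ele]

-- ===== PORT B =====
def maximumEvenSplit_alt (finalSum : Int) : List Int :=
  if PySem.Int.mod finalSum 2 = 1 then []
  else
    -- math.isqrt → Nat.sqrt (exact for 1 + 4*finalSum ≥ 0; negative arguments raise, excluded by Pre_)
    let k : Int := PySem.Int.floordiv ((Nat.sqrt (1 + 4 * finalSum).toNat : Int) - 1) 2
    let ans := PySem.List.pyRange 2 (2 * k + 1) 2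
    let remainder := finalSum - k * (k + 1)
    ans.dropLast ++ [PySem.List.pyGetD ans (-1) 0 + remainder]   -- ans[-1] += remainder; IndexError on empty excluded by Pre_

-- ===== PRECONDITION & SPEC =====
-- Pre_ excludes exactly the inputs where A raises: even finalSum ≤ 0 (ans.pop() on an empty list, IndexError).
def Pre_maximumEvenSplit (finalSum : Int) : Prop :=
  PySem.Int.mod finalSum 2 = 1 ∨ 2 ≤ finalSum
instance (finalSum : Int) : Decidable (Pre_maximumEvenSplit finalSum) := by
  unfold Pre_maximumEvenSplit; infer_instance

def pvWitness_maximumEvenSplit : Int := 12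

def Spec_maximumEvenSplit (finalSum : Int) (out : List Int) : Prop := out = maximumEvenSplit_alt finalSum
instance (finalSum : Int) (out : List Int) : Decidable (Spec_maximumEvenSplit finalSum out) := by unfold Spec_maximumEvenSplit; infer_instance

-- ===== CLAIM (what is proved, stated in full; the proofs are below) =====
def Claim_equal_maximumEvenSplit : Prop := ∀ (finalSum : Int), Dom_maximumEvenSplit finalSum → Pre_maximumEvenSplit finalSum → Spec_maximumEvenSplit finalSum (maximumEvenSplit finalSum)

-- ===== LEMMAS AND PROOFS =====

-- the largest k with k*(k+1) ≤ s, for s ≥ 2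
def pvK (s : Int) : Nat := (Nat.sqrt (1 + 4 * s).toNat - 1) / 2

lemma pvK_spec (s : Int) (hs : 2 ≤ s) :
    ((pvK s : Int) * (pvK s + 1) ≤ s) ∧ (s < ((pvK s : Int) + 1) * ((pvK s : Int) + 2)) ∧ 1 ≤ pvK s := by
  have hn : ((1 + 4 * s).toNat : Int) = 1 + 4 * s := by omega
  set n := (1 + 4 * s).toNat with hn'
  set q := Nat.sqrt n with hq
  have h1 : q * q ≤ n := by have := Nat.sqrt_le' n; rwa [pow_two] at this
  have h2 : n < (q + 1) * (q + 1) := by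
    have := Nat.lt_succ_sqrt' n; rwa [pow_two, Nat.succ_eq_add_one] at this
  have hq3 : 3 ≤ q := by
    by_contra h
    have : q + 1 ≤ 3 := by omega
    have : (q + 1) * (q + 1) ≤ 9 := Nat.mul_le_mul this this
    omega
  have hk : pvK s = (q - 1) / 2 := rfl
  set k := pvK s with hk'
  have hk1 : 2 * k + 1 ≤ q := by omega
  have hk2 : q ≤ 2 * k + 2 := by omega
  refine ⟨?_, ?_, by omega⟩
  · have : (2 * k + 1) * (2 * k + 1) ≤ n := le_trans (Nat.mul_le_mul hk1 hk1) h1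
    have := (Int.ofNat_le).2 this
    push_cast at this
    rw [hn] at this
    nlinarith
  · have : n < (2 * k + 3) * (2 * k + 3) := by
      calc n < (q + 1) * (q + 1) := h2
        _ ≤ (2 * k + 3) * (2 * k + 3) := Nat.mul_le_mul (by omega) (by omega)
    have := (Int.ofNat_lt).2 this
    push_cast at this
    rw [hn] at this
    nlinarith

-- step condition of A's loop, phrased through pvK
lemma pvK_step (s : Int) (hs : 2 ≤ s) (j : Nat) :
    (((j : Int) + 1) * ((j : Int) + 2) ≤ s) ↔ j + 1 ≤ pvK s := by
  obtain ⟨hK1, hK2, _⟩ := pvK_spec s hs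
  constructor
  · intro h
    by_contra hc
    have hj : pvK s ≤ j := by omega
    have : ((pvK s : Int) + 1) * ((pvK s : Int) + 2) ≤ ((j : Int) + 1) * ((j : Int) + 2) := by
      have : (pvK s : Int) ≤ j := by exact_mod_cast hj
      nlinarith
    omega
  · intro h
    have hj : ((j : Int) + 1) ≤ pvK s := by exact_mod_cast h
    nlinarith

-- canonical output list prefix: [2, 4, ..., 2k]
def pvC (k : Nat) : List Int := (List.range k).map (fun t : Nat => 2 + 2 * (t : Int))

lemma pvC_length (k : Nat) : (pvC k).length = k := by
  unfold pvC; simp only [List.length_map, List.length_range]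

lemma pvC_getElem (k j : Nat) (hj : j < (pvC k).length) : (pvC k)[j] = 2 + 2 * (j : Int) := by
  unfold pvC at hj ⊢
  simp only [List.getElem_map, List.getElem_range]

lemma pvLoopA_spec (s : Int) (hs : 2 ≤ s) : ∀ (fuel j : Nat) (ans : List Int),
    j ≤ pvK s → pvK s < j + fuel →
    pvLoopA s fuel ((j : Int) * ((j : Int) + 1)) (2 * (j : Int) + 2) ans
      = (ans ++ (pvC (pvK s)).drop j, (pvK s : Int) * ((pvK s : Int) + 1)) := by
  intro fuel
  induction fuel with
  | zero => intro j ans h1 h2; omega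
  | succ fuel ih =>
    intro j ans h1 h2
    rw [pvLoopA]
    have hcond : ((j : Int) * ((j : Int) + 1) + (2 * (j : Int) + 2) ≤ s) ↔ j + 1 ≤ pvK s := by
      rw [← pvK_step s hs j]; constructor <;> intro h <;> nlinarith
    by_cases hstep : j + 1 ≤ pvK s
    · rw [if_pos (hcond.2 hstep)]
      have e1 : (j : Int) * ((j : Int) + 1) + (2 * (j : Int) + 2)
          = ((j : Int) + 1) * (((j : Int) + 1) + 1) := by ring
      have e2 : 2 * (j : Int) + 2 + 2 = 2 * (((j : Int) + 1)) + 2 := by ring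
      have e3 : ((j : Int) + 1) = ((j + 1 : Nat) : Int) := by push_cast; ring
      rw [e1, e2, e3]
      rw [ih (j + 1) (ans ++ [2 * (j : Int) + 2]) hstep (by omega)]
      have hj : j < (pvC (pvK s)).length := by rw [pvC_length]; omega
      have hdrop : (pvC (pvK s)).drop j = (2 * (j : Int) + 2) :: (pvC (pvK s)).drop (j + 1) := by
        rw [List.drop_eq_getElem_cons hj, pvC_getElem (pvK s) j hj]
        norm_num
        ring
      rw [hdrop]
      simp
    · rw [if_neg (fun h => hstep (hcond.1 h))]
      have hj : j = pvK s := by omega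
      subst hj
      simp [List.drop_of_length_le (le_of_eq (pvC_length (pvK s)))]

-- B's k equals pvK on s ≥ 2
lemma pvAlt_k (s : Int) (hs : 2 ≤ s) :
    PySem.Int.floordiv ((Nat.sqrt (1 + 4 * s).toNat : Int) - 1) 2 = (pvK s : Int) := by
  have hq3 : 3 ≤ Nat.sqrt (1 + 4 * s).toNat := by
    have h2 : (1 + 4 * s).toNat < (Nat.sqrt (1 + 4 * s).toNat + 1) * (Nat.sqrt (1 + 4 * s).toNat + 1) := by
      have := Nat.lt_succ_sqrt' (1 + 4 * s).toNat
      rwa [pow_two, Nat.succ_eq_add_one] at this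
    by_contra h
    have h3 : Nat.sqrt (1 + 4 * s).toNat + 1 ≤ 3 := by omega
    have : (Nat.sqrt (1 + 4 * s).toNat + 1) * (Nat.sqrt (1 + 4 * s).toNat + 1) ≤ 9 :=
      Nat.mul_le_mul h3 h3
    omega
  rw [PySem.Int.floordiv_eq_iff_of_pos (by norm_num)]
  unfold pvK
  set q := Nat.sqrt (1 + 4 * s).toNat with hq
  constructor
  · omega
  · omega

-- B's range equals pvC
lemma pvAlt_range (k : Nat) :
    PySem.List.pyRange 2 (2 * (k : Int) + 1) 2 = pvC k := by
  rw [PySem.List.pyRange_of_pos 2 (2 * (k : Int) + 1) (by norm_num)]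
  unfold pvC
  by_cases hk : 1 ≤ k
  · have hlt : (2 : Int) < 2 * (k : Int) + 1 := by
      have : (1 : Int) ≤ (k : Int) := by exact_mod_cast hk
      omega
    rw [if_pos hlt]
    have he : ((2 * (k : Int) + 1 - 2 + 2 - 1) / 2).toNat = k := by
      have : (2 * (k : Int) + 1 - 2 + 2 - 1) = 2 * (k : Int) := by ring
      rw [this]
      omega
    rw [he]
  · have hk0 : k = 0 := by omega
    subst hk0
    norm_num

lemma pv_even_case (s : Int) (hs : 2 ≤ s) (hmod : ¬ PySem.Int.mod s 2 = 1) :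
    maximumEvenSplit s = maximumEvenSplit_alt s := by
  unfold maximumEvenSplit maximumEvenSplit_alt
  rw [if_neg hmod, if_neg hmod]
  obtain ⟨hK1, hK2, hK3⟩ := pvK_spec s hs
  have hfuel : pvK s < 0 + (s.toNat + 1) := by
    have : (pvK s : Int) ≤ s := by nlinarith
    omega
  have hA := pvLoopA_spec s hs (s.toNat + 1) 0 [] (by omega) hfuel
  norm_num at hA
  simp only [hA, pvAlt_k s hs, pvAlt_range]

-- ===== VERDICT (by name: the statement is the Claim_ definition above) =====
theorem maximumEvenSplit_spec : Claim_equal_maximumEvenSplit := by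
  intro s _ hpre
  unfold Spec_maximumEvenSplit
  by_cases hmod : PySem.Int.mod s 2 = 1
  · unfold maximumEvenSplit maximumEvenSplit_alt
    rw [if_pos hmod, if_pos hmod]
  · have hs : 2 ≤ s := by
      rcases hpre with h | h
      · exact absurd h hmod
      · exact h
    exact pv_even_case s hs hmod
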